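-- pv_equiv track=rewrite | github.com/OrdinaryOrgan/NodeSaf | neural/ProposedAlgo/neural.py | ext_conn
-- ===== SOURCE A (Python) =====
-- def ext_conn(comm, target, IG_edgeList):
--   con = []
--   for i in comm:
--     count = 0
--     for j in target:
--       if ((i, j) in IG_edgeList or (j, i) in IG_edgeList):
--         count = count + 1
--     con.append(count)
--   return con
-- ===== SOURCE B (Python) =====
-- def ext_conn(comm, target, IG_edgeList):
--     # Index the edge list once into an adjacency dict, count target multiplicities
--     # once, then answer each comm node by summing over its distinct neighbors.
--     adj = {}
--     for a, b in IG_edgeList: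
--         adj.setdefault(a, set()).add(b)
--         adj.setdefault(b, set()).add(a)
--     tc = {}
--     for x in target:
--         tc[x] = tc.get(x, 0) + 1
--     return [sum(tc.get(x, 0) for x in adj.get(i, set())) for i in comm]
-- ===== Notes on version B (the rewrite author's own statement) =====
-- stated objective: faster
-- what changed: B builds an adjacency dict from the edge list in one pass and a multiplicity table of target, then answers each comm node by summing target multiplicities over its distinct neighbors, instead of rescanning the whole edge list for every comm x target pair.
import Mathlib
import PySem

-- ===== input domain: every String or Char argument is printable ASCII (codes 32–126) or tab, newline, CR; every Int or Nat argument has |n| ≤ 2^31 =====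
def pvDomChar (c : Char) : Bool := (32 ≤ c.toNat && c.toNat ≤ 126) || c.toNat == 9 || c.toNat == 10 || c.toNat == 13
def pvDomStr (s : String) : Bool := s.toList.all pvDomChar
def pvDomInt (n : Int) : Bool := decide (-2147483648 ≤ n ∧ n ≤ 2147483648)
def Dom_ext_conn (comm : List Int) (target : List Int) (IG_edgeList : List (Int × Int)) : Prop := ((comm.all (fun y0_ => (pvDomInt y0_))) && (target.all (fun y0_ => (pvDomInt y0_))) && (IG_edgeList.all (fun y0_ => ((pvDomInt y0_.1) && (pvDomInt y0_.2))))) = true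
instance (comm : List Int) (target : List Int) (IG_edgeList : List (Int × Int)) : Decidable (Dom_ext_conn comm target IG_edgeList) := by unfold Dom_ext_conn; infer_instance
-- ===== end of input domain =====

-- B indexes the edge list into an adjacency dict once and sums target multiplicities
-- over distinct neighbors, instead of rescanning the edge list per comm×target pair (faster).

-- ===== PORT A =====
def ext_conn (comm : List Int) (target : List Int) (IG_edgeList : List (Int × Int)) : List Int :=
  comm.foldl (fun con i =>
    con ++ [target.foldl (fun count j =>
      if (i, j) ∈ IG_edgeList ∨ (j, i) ∈ IG_edgeList then count + 1 else count) 0]) []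

-- ===== PORT B =====
-- adjacency dict: for each edge (a,b), adj.setdefault(a,set()).add(b); adj.setdefault(b,set()).add(a)
def pvAdj (IG_edgeList : List (Int × Int)) : PySem.Dict Int (PySem.Set Int) :=
  IG_edgeList.foldl (fun d p =>
    (d.modify p.1 PySem.Set.empty (fun s => s.add p.2)).modify p.2 PySem.Set.empty (fun s => s.add p.1))
    PySem.Dict.empty

def ext_conn_alt (comm : List Int) (target : List Int) (IG_edgeList : List (Int × Int)) : List Int :=
  let adj := pvAdj IG_edgeList
  let tc := target.foldl (fun d x => d.insert x (d.getD x 0 + 1)) PySem.Dict.empty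
  comm.map (fun i => (adj.getD i PySem.Set.empty).foldl (fun s x => s + tc.getD x 0) 0)

-- ===== PRECONDITION & SPEC =====
def Spec_ext_conn (comm : List Int) (target : List Int) (IG_edgeList : List (Int × Int)) (out : List Int) : Prop := out = ext_conn_alt comm target IG_edgeList
instance (comm : List Int) (target : List Int) (IG_edgeList : List (Int × Int)) (out : List Int) : Decidable (Spec_ext_conn comm target IG_edgeList out) := by unfold Spec_ext_conn; infer_instance

-- ===== CLAIM (what is proved, stated in full; the proofs are below) =====
def Claim_equal_ext_conn : Prop := ∀ (comm : List Int) (target : List Int) (IG_edgeList : List (Int × Int)), Dom_ext_conn comm target IG_edgeList → Spec_ext_conn comm target IG_edgeList (ext_conn comm target IG_edgeList)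

-- ===== LEMMAS AND PROOFS =====

-- membership in the adjacency set of i after one edge step
theorem pv_step_mem (d : PySem.Dict Int (PySem.Set Int)) (a b i x : Int) :
    (x ∈ ((d.modify a PySem.Set.empty (fun s => s.add b)).modify b PySem.Set.empty (fun s => s.add a)).getD i PySem.Set.empty)
      ↔ (x ∈ d.getD i PySem.Set.empty ∨ (i = a ∧ x = b) ∨ (i = b ∧ x = a)) := by
  simp only [PySem.Dict.getD_modify]
  split_ifs <;> simp [PySem.Set.mem_add] <;> subst_vars <;> tauto

theorem pv_adj_fold_mem (E : List (Int × Int)) (d : PySem.Dict Int (PySem.Set Int)) (i x : Int) :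
    (x ∈ (E.foldl (fun d p =>
        (d.modify p.1 PySem.Set.empty (fun s => s.add p.2)).modify p.2 PySem.Set.empty (fun s => s.add p.1)) d).getD i PySem.Set.empty)
      ↔ (x ∈ d.getD i PySem.Set.empty ∨ (i, x) ∈ E ∨ (x, i) ∈ E) := by
  induction E generalizing d with
  | nil => simp
  | cons p E ih =>
    simp only [List.foldl_cons, ih, pv_step_mem, List.mem_cons, Prod.ext_iff]
    tauto

theorem pv_adj_mem (E : List (Int × Int)) (i x : Int) :
    (x ∈ (pvAdj E).getD i PySem.Set.empty) ↔ ((i, x) ∈ E ∨ (x, i) ∈ E) := by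
  unfold pvAdj
  rw [pv_adj_fold_mem]
  simp [PySem.Dict.getD_empty, PySem.Set.empty]

theorem pv_adj_fold_nodup (E : List (Int × Int)) (d : PySem.Dict Int (PySem.Set Int))
    (h : ∀ i, (d.getD i PySem.Set.empty).Nodup) (i : Int) :
    ((E.foldl (fun d p =>
        (d.modify p.1 PySem.Set.empty (fun s => s.add p.2)).modify p.2 PySem.Set.empty (fun s => s.add p.1)) d).getD i PySem.Set.empty).Nodup := by
  induction E generalizing d with
  | nil => exact h i
  | cons p E ih =>
    refine ih _ (fun j => ?_)
    simp only [PySem.Dict.getD_modify]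
    split_ifs <;> first
      | exact PySem.Set.nodup_add _ _ (PySem.Set.nodup_add _ _ (h _))
      | exact PySem.Set.nodup_add _ _ (h _)
      | exact h _

theorem pv_adj_nodup (E : List (Int × Int)) (i : Int) : ((pvAdj E).getD i PySem.Set.empty).Nodup := by
  unfold pvAdj
  exact pv_adj_fold_nodup E _ (fun j => by simp [PySem.Dict.getD_empty, PySem.Set.empty]) i

-- Nat-valued: summing counts over a nodup set = counting membership
theorem pv_map_sum_add (S : List Int) (f g : Int → Nat) :
    (S.map (fun x => f x + g x)).sum = (S.map f).sum + (S.map g).sum := by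
  induction S with
  | nil => simp
  | cons s S ih => simp [ih]; omega

theorem pv_sum_ite (j : Int) (S : List Int) (h : S.Nodup) :
    (S.map (fun x => if j = x then 1 else 0)).sum = (if j ∈ S then 1 else 0 : Nat) := by
  induction S with
  | nil => simp
  | cons s S ih =>
    rcases List.nodup_cons.mp h with ⟨hs, hS⟩
    simp only [List.map_cons, List.sum_cons, List.mem_cons]
    by_cases hj : j = s
    · subst hj
      have h0 : (S.map (fun x => if j = x then 1 else 0)).sum = 0 := by
        rw [List.sum_eq_zero]
        intro n hn
        rcases List.mem_map.mp hn with ⟨x, hx, rfl⟩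
        simp [show ¬ (j = x) from fun e => hs (e ▸ hx)]
      rw [h0]
      simp
    · rw [ih hS]
      simp [hj]

theorem pv_sum_count (t S : List Int) (h : S.Nodup) :
    (S.map (fun x => t.count x)).sum = t.countP (fun j => decide (j ∈ S)) := by
  induction t with
  | nil => simp
  | cons j t ih =>
    simp only [List.count_cons, List.countP_cons, beq_iff_eq]
    rw [pv_map_sum_add, ih, pv_sum_ite j S h]
    by_cases hj : j ∈ S <;> simp [hj]

theorem pv_cast_sum (S : List Int) (f : Int → Nat) :
    (S.map (fun x => ((f x : Nat) : Int))).sum = ((S.map f).sum : Int) := by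
  induction S with
  | nil => simp
  | cons s S ih => simp [ih]

-- ===== VERDICT (by name: the statement is the Claim_ definition above) =====
theorem ext_conn_spec : Claim_equal_ext_conn := by
  intro comm target E _
  unfold Spec_ext_conn ext_conn ext_conn_alt
  rw [PySem.List.foldl_append_singleton_eq_map]
  simp only [List.nil_append]
  refine List.map_congr_left (fun i _ => ?_)
  rw [PySem.List.foldl_ite_add_one, PySem.List.foldl_add,
    PySem.Dict.foldl_insert_getD_add_one_eq_counter]
  simp only [PySem.Dict.getD_counter, zero_add]
  rw [pv_cast_sum, pv_sum_count target _ (pv_adj_nodup E i)]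
  congr 1
  exact List.countP_congr (fun x _ => by
    simp only [decide_eq_true_eq]
    exact (pv_adj_mem E i x).symm)
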